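-- pv_equiv track=rewrite | github.com/gahjelle/advent_of_code | python/src/2025/02_gift-shop/aoc202502_loops.py | is_super_silly
-- ===== SOURCE A (Python) =====
-- from collections.abc import Generator
--
-- def is_super_silly(ids: list[str]) -> Generator[str]:
--     """Identify super silly IDs."""
--     for id in ids:
--         length = len(id)
--         for n in range(1, length // 2 + 1):
--             if length % n:
--                 continue
--             first = id[:n]
--             super_silly = True
--             for idx in range(n, length, n):
--                 second = id[idx : idx + n]
--                 if first != second:
--                     super_silly = False
--                     break
--             if super_silly:
--                 yield id
--                 break
-- ===== SOURCE B (Python) =====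
-- def is_super_silly(ids):
--     """Identify super silly IDs: an ID made of a smaller block repeated.
--
--     A string is a nontrivial repetition iff it occurs inside its own
--     doubling with both ends chopped off -- one substring search instead
--     of trying every divisor block by block.
--     """
--     for id in ids:
--         if id and id in (id + id)[1:-1]:
--             yield id
-- ===== Notes on version B (the rewrite author's own statement) =====
-- stated objective: faster
-- what changed: A tests every candidate block length by comparing all blocks of the ID against the first one; B replaces the whole divisor/block search by the classic doubling trick: an ID is a repeated block iff it is nonempty and occurs as a substring of (id+id)[1:-1], one substring search per ID.
import Mathlib
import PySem

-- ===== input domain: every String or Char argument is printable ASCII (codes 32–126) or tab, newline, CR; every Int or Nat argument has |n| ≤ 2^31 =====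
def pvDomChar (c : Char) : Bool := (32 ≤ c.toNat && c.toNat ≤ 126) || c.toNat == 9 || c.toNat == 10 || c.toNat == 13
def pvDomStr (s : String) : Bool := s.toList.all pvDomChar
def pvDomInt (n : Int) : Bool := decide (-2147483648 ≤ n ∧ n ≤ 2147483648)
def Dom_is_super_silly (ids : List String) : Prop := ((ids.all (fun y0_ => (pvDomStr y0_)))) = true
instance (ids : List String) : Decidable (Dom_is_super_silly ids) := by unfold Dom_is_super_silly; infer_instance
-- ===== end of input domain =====

-- B replaces A's divisor-by-divisor block comparison with one substring test per ID: a nonempty id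
-- is a repeated block iff it occurs inside (id+id)[1:-1].


-- ===== PORT A =====
-- inner loop 'for idx in range(n, length, n)' with the super_silly flag and its break
def pvAinner (id : List Char) (first : List Char) (n : Int) : List Int → Bool
  | [] => true
  | idx :: rest =>
    let second := PySem.List.slice id (some idx) (some (idx + n))
    if first ≠ second then false
    else pvAinner id first n rest

-- outer loop 'for n in range(1, length // 2 + 1)' with 'continue' and the break after yield
def pvAouter (id : List Char) (length : Int) : List Int → Bool
  | [] => false
  | n :: rest =>
    if PySem.Int.mod length n ≠ 0 then pvAouter id length rest
    else
      let first := PySem.List.slice id none (some n)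
      if pvAinner id first n (PySem.List.pyRange n length n) then true
      else pvAouter id length rest

def is_super_silly (ids : List String) : List String :=
  ids.foldl (fun acc id =>
    let length : Int := PySem.Str.len id
    if pvAouter id.toList length (PySem.List.pyRange 1 (PySem.Int.floordiv length 2 + 1) 1)
    then acc ++ [id] else acc) []

-- ===== PORT B =====
-- 'id and id in (id + id)[1:-1]'
def pvRepeated (id : String) : Bool :=
  !(id == "") && PySem.Str.isIn id (PySem.Str.slice (id ++ id) (some 1) (some (-1)))

def is_super_silly_alt (ids : List String) : List String :=
  ids.foldl (fun acc id => if pvRepeated id then acc ++ [id] else acc) []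

-- ===== PRECONDITION & SPEC =====
def Spec_is_super_silly (ids : List String) (out : List String) : Prop := out = is_super_silly_alt ids
instance (ids : List String) (out : List String) : Decidable (Spec_is_super_silly ids out) := by unfold Spec_is_super_silly; infer_instance

-- ===== CLAIM (what is proved, stated in full; the proofs are below) =====
def Claim_equal_is_super_silly : Prop := ∀ (ids : List String), Dom_is_super_silly ids → Spec_is_super_silly ids (is_super_silly ids)

-- ===== LEMMAS AND PROOFS =====

-- 'cs has period m everywhere': every position equals its index reduced mod m
def pvPerAll (cs : List Char) (m : Nat) : Prop := ∀ i < cs.length, cs[i]? = cs[i % m]?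

-- 'cs is fixed under rotation by k'
def pvRot (cs : List Char) (k : Nat) : Prop := ∀ i < cs.length, cs[(i + k) % cs.length]? = cs[i]?

-- what A's per-string test means
def pvPropA (cs : List Char) : Prop :=
  ∃ m : Nat, 1 ≤ m ∧ m ≤ cs.length / 2 ∧ m ∣ cs.length ∧ pvPerAll cs m

-- the inner loop is an 'all'
theorem pvAinner_eq_all (id first : List Char) (n : Int) (idxs : List Int) :
    pvAinner id first n idxs
      = idxs.all (fun idx => first == PySem.List.slice id (some idx) (some (idx + n))) := by
  induction idxs with
  | nil => rfl
  | cons idx rest ih =>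
    rw [List.all_cons, ← ih]
    by_cases h : first = PySem.List.slice id (some idx) (some (idx + n)) <;>
      simp [pvAinner, h]

-- the outer loop is an 'any'
theorem pvAouter_eq_any (id : List Char) (len : Int) (ns : List Int) :
    pvAouter id len ns
      = ns.any (fun n => (PySem.Int.mod len n == 0)
          && pvAinner id (PySem.List.slice id none (some n)) n (PySem.List.pyRange n len n)) := by
  induction ns with
  | nil => rfl
  | cons n rest ih =>
    rw [List.any_cons, ← ih]
    by_cases h : PySem.Int.mod len n = 0
    · by_cases h2 : pvAinner id (PySem.List.slice id none (some n)) n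
          (PySem.List.pyRange n len n) <;> simp [pvAouter, h, h2]
    · simp [pvAouter, h]

theorem pvPerAll_of_blocks (cs : List Char) (m : Nat) (hm : 1 ≤ m)
    (h : ∀ q : Nat, m ∣ q → q < cs.length → (cs.drop q).take m = cs.take m) :
    pvPerAll cs m := by
  intro i hi
  have hqi : m * (i / m) + i % m = i := Nat.div_add_mod i m
  have hb := h (m * (i / m)) ⟨i / m, rfl⟩ (by omega)
  have hr : i % m < m := Nat.mod_lt _ hm
  have hc := congrArg (fun l => l[i % m]?) hb
  simpa [List.getElem?_take, List.getElem?_drop, hr, hqi] using hc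

theorem pvBlocks_of_perAll (cs : List Char) (m : Nat) (hd : m ∣ cs.length)
    (h : pvPerAll cs m) :
    ∀ q : Nat, m ∣ q → q < cs.length → (cs.drop q).take m = cs.take m := by
  intro q hqd hqL
  have hmL : m ≤ cs.length := Nat.le_of_dvd (by omega) hd
  have hqm : q + m ≤ cs.length := by
    rcases hd with ⟨c, hc⟩; rcases hqd with ⟨e, he⟩
    have hec : e < c := by
      by_contra hcon
      push_neg at hcon
      have := Nat.mul_le_mul_left m hcon
      omega
    have h2 : m * (e + 1) ≤ m * c := Nat.mul_le_mul_left m hec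
    have h3 : m * (e + 1) = m * e + m := by ring
    omega
  apply List.ext_getElem?
  intro j
  by_cases hj : j < m
  · rw [List.getElem?_take, List.getElem?_take, if_pos hj, if_pos hj, List.getElem?_drop]
    have h1 := h (q + j) (by omega)
    have h2 := h j (by omega)
    have e1 : (q + j) % m = j % m := by
      rcases hqd with ⟨e, rfl⟩; exact Nat.mul_add_mod m e j
    rw [h1, h2, e1]
  · rw [List.getElem?_take, List.getElem?_take, if_neg hj, if_neg hj]

-- A's boolean ↔ pvPropA
theorem pvAbool_iff (cs : List Char) :
    pvAouter cs (cs.length : Int)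
        (PySem.List.pyRange 1 (PySem.Int.floordiv (cs.length : Int) 2 + 1) 1) = true
      ↔ pvPropA cs := by
  have hfd : PySem.Int.floordiv (cs.length : Int) 2 = ((cs.length / 2 : Nat) : Int) := by
    simpa using PySem.Int.floordiv_natCast cs.length 2
  rw [pvAouter_eq_any, List.any_eq_true]
  constructor
  · rintro ⟨n, hmem, hcond⟩
    rw [PySem.List.mem_pyRange_one, hfd] at hmem
    obtain ⟨h1, h2⟩ := hmem
    set m := n.toNat with hmdef
    have hn : n = (m : Int) := by omega
    have hm1 : 1 ≤ m := by omega
    have hm2 : m ≤ cs.length / 2 := by omega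
    rw [Bool.and_eq_true, beq_iff_eq] at hcond
    obtain ⟨hmod, hinner⟩ := hcond
    have hdvd : m ∣ cs.length := by
      rw [PySem.Int.mod_eq_zero_iff_dvd, hn] at hmod
      exact_mod_cast hmod
    refine ⟨m, hm1, hm2, hdvd, ?_⟩
    apply pvPerAll_of_blocks cs m hm1
    intro q hq hqL
    rw [pvAinner_eq_all, List.all_eq_true] at hinner
    by_cases hq0 : q = 0
    · subst hq0; simp
    · have hmemq : ((q : Nat) : Int) ∈ PySem.List.pyRange n (cs.length : Int) n := by
        rw [PySem.List.mem_pyRange_iff_of_pos (by omega)]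
        have hmq : m ≤ q := Nat.le_of_dvd (Nat.pos_of_ne_zero hq0) hq
        refine ⟨by omega, by exact_mod_cast hqL, ?_⟩
        rcases hq with ⟨e, rfl⟩
        refine ⟨(e : Int) - 1, ?_⟩
        rw [hn]; push_cast; ring
      have hb := hinner _ hmemq
      rw [beq_iff_eq, hn, PySem.List.slice_to_natCast, PySem.List.slice_natCast_add] at hb
      exact hb.symm
  · rintro ⟨m, hm1, hm2, hdvd, hper⟩
    refine ⟨(m : Int), ?_, ?_⟩
    · rw [PySem.List.mem_pyRange_one, hfd]
      constructor
      · exact_mod_cast hm1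
      · exact_mod_cast Nat.lt_succ_of_le hm2
    · rw [Bool.and_eq_true, beq_iff_eq]
      constructor
      · rw [PySem.Int.mod_eq_zero_iff_dvd]
        exact_mod_cast hdvd
      · rw [pvAinner_eq_all, List.all_eq_true]
        intro idx hidx
        rw [PySem.List.mem_pyRange_iff_of_pos (by exact_mod_cast hm1)] at hidx
        obtain ⟨hi1, hi2, hi3⟩ := hidx
        set q := idx.toNat with hqdef
        have hm0 : (0 : Int) < (m : Int) := by exact_mod_cast hm1
        have hidxq : idx = (q : Int) := by omega
        have hqd : m ∣ q := by
          have hdi : (m : Int) ∣ idx := by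
            have := dvd_add hi3 (dvd_refl (m : Int))
            simpa using this
          rw [hidxq] at hdi
          exact_mod_cast hdi
        rw [beq_iff_eq, hidxq, PySem.List.slice_to_natCast, PySem.List.slice_natCast_add]
        exact (pvBlocks_of_perAll cs m hdvd hper q hqd (by omega)).symm

-- rotation-invariance is additive and depends only on the residue mod the length
theorem pvRot_add (cs : List Char) (a b : Nat) (ha : pvRot cs a) (hb : pvRot cs b) :
    pvRot cs (a + b) := by
  intro i hi
  have h1 : (i + (a + b)) % cs.length = ((i + a) % cs.length + b) % cs.length := by
    rw [Nat.mod_add_mod, Nat.add_assoc]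
  rw [h1, hb ((i + a) % cs.length) (Nat.mod_lt _ (by omega)), ha i hi]

theorem pvRot_congr (cs : List Char) (a b : Nat) (h : a % cs.length = b % cs.length)
    (ha : pvRot cs a) : pvRot cs b := by
  intro i hi
  have e : (i + b) % cs.length = (i + a) % cs.length := by
    rw [Nat.add_mod i b, Nat.add_mod i a, h]
  rw [e]
  exact ha i hi

theorem pvRot_mul (cs : List Char) (k t : Nat) (hk : pvRot cs k) : pvRot cs (t * k) := by
  induction t with
  | zero =>
    intro i hi
    simp [Nat.mod_eq_of_lt hi]
  | succ t ih =>
    have : (t + 1) * k = t * k + k := by ring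
    rw [this]
    exact pvRot_add cs (t * k) k ih hk

-- Bezout, in Nat mod form
theorem pvBezout (k L : Nat) (hL : 0 < L) : ∃ t : Nat, (t * k) % L = (Nat.gcd k L) % L := by
  refine ⟨((Nat.gcdA k L) % (L : Int)).toNat, ?_⟩
  have hL0 : ((L : Int)) ≠ 0 := by exact_mod_cast Nat.pos_iff_ne_zero.mp hL
  set a := Nat.gcdA k L with hadef
  have hnn : 0 ≤ a % (L : Int) := Int.emod_nonneg a hL0
  have ht : (((a % (L : Int)).toNat : Int)) = a % (L : Int) := Int.toNat_of_nonneg hnn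
  have hkey : ((((a % (L : Int)).toNat * k) % L : Nat) : Int) = (((Nat.gcd k L) % L : Nat) : Int) := by
    push_cast
    rw [ht]
    rw [Int.mul_emod (a % (L : Int)) (k : Int), Int.emod_emod_of_dvd a dvd_rfl, ← Int.mul_emod]
    have hb := Nat.gcd_eq_gcd_ab k L
    have ha2 : a * (k : Int) = (Nat.gcd k L : Int) + (L : Int) * (-(Nat.gcdB k L)) := by
      rw [hb]; ring
    rw [ha2, Int.add_mul_emod_self_left]
  exact_mod_cast hkey

theorem pvPerAll_of_per (cs : List Char) (m : Nat) (hm : 1 ≤ m)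
    (h : ∀ i, i + m < cs.length → cs[i + m]? = cs[i]?) : pvPerAll cs m := by
  intro i
  induction i using Nat.strong_induction_on with
  | _ i ih =>
    intro hi
    by_cases hlt : i < m
    · rw [Nat.mod_eq_of_lt hlt]
    · push_neg at hlt
      have h1 : i - m + m = i := Nat.sub_add_cancel hlt
      have h2 := h (i - m) (by omega)
      rw [h1] at h2
      have e : i % m = (i - m) % m := by
        conv_lhs => rw [← h1]
        rw [Nat.add_mod_right]
      rw [h2, ih (i - m) (by omega) (by omega), e]

theorem pvPerAll_gcd_of_rot (cs : List Char) (k : Nat) (hk : 1 ≤ k) (hkL : k < cs.length)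
    (h : pvRot cs k) : pvPerAll cs (Nat.gcd k cs.length) := by
  have hL : 0 < cs.length := by omega
  obtain ⟨t, ht⟩ := pvBezout k cs.length hL
  have hg : pvRot cs (Nat.gcd k cs.length) :=
    pvRot_congr cs (t * k) _ ht (pvRot_mul cs k t h)
  apply pvPerAll_of_per cs _ (Nat.gcd_pos_of_pos_left cs.length hk)
  intro i him
  have := hg i (by omega)
  rwa [Nat.mod_eq_of_lt him] at this

-- rotating by a full period reassembles the string
theorem pvRotEq_of_perAll (cs : List Char) (m : Nat) (hd : m ∣ cs.length)
    (h : pvPerAll cs m) : cs.drop m ++ cs.take m = cs := by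
  by_cases h0 : cs.length = 0
  · rw [List.length_eq_zero_iff] at h0
    subst h0; simp
  have hmL : m ≤ cs.length := Nat.le_of_dvd (by omega) hd
  apply List.ext_getElem?
  intro i
  have hld : (cs.drop m).length = cs.length - m := by simp
  by_cases hi : i < cs.length
  · by_cases hi1 : i < cs.length - m
    · rw [List.getElem?_append_left (by omega), List.getElem?_drop]
      rw [h (m + i) (by omega), h i hi, Nat.add_mod_left]
    · rw [List.getElem?_append_right (by omega), hld, List.getElem?_take,
        if_pos (by omega)]
      have e : (i - (cs.length - m)) % m = i % m := by
        rcases hd with ⟨c, hc⟩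
        cases c with
        | zero => omega
        | succ c' =>
          have hce : cs.length = m * c' + m := by rw [hc]; ring
          have hDm : cs.length - m = m * c' := by omega
          have e3 : i = (i - (cs.length - m)) + (cs.length - m) := by omega
          calc (i - (cs.length - m)) % m
              = (i - (cs.length - m) + m * c') % m := (Nat.add_mul_mod_self_left _ m c').symm
            _ = i % m := by rw [← hDm, ← e3]
      rw [h (i - (cs.length - m)) (by omega), h i hi, e]
  · rw [List.getElem?_eq_none (by simp; omega), List.getElem?_eq_none (by omega)]

-- the [1:-1] slice of the doubled string
theorem pvSlice_double (cs : List Char) :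
    PySem.List.slice (cs ++ cs) (some 1) (some (-1)) = cs.drop 1 ++ cs.dropLast := by
  by_cases h0 : cs.length = 0
  · rw [List.length_eq_zero_iff] at h0
    subst h0; rfl
  have hL : 1 ≤ cs.length := by omega
  have ha : PySem.List.clampIdx (cs ++ cs).length 1 = 1 := by
    simp only [PySem.List.clampIdx, List.length_append]
    split_ifs <;> omega
  have hb : PySem.List.clampIdx (cs ++ cs).length (-1) = 2 * cs.length - 1 := by
    simp only [PySem.List.clampIdx, List.length_append]
    split_ifs <;> omega
  show ((cs ++ cs).drop (PySem.List.clampIdx (cs ++ cs).length 1)).take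
      (PySem.List.clampIdx (cs ++ cs).length (-1) - PySem.List.clampIdx (cs ++ cs).length 1)
      = cs.drop 1 ++ cs.dropLast
  rw [ha, hb]
  rw [List.drop_append_of_le_length (by omega), List.take_append]
  have h1 : (cs.drop 1).length = cs.length - 1 := by simp
  rw [List.take_of_length_le (by omega)]
  congr 1
  rw [List.dropLast_eq_take]
  congr 1
  omega

theorem pvInfix_of_propA (cs : List Char) (h : pvPropA cs) :
    cs ≠ [] ∧ cs <:+: cs.drop 1 ++ cs.dropLast := by
  obtain ⟨m, hm1, hm2, hdvd, hper⟩ := h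
  have hL2 : 2 ≤ cs.length := by omega
  have hne : cs ≠ [] := by
    intro h0; rw [h0] at hL2; simp at hL2
  refine ⟨hne, ?_⟩
  have hrot := pvRotEq_of_perAll cs m hdvd hper
  have hmL : m ≤ cs.length - 1 := by omega
  have hdr : (cs.drop 1 ++ cs.dropLast).drop (m - 1) = cs.drop m ++ cs.dropLast := by
    rw [List.drop_append]
    have h1 : (cs.drop 1).length = cs.length - 1 := by simp
    rw [List.drop_drop]
    have e1 : 1 + (m - 1) = m := by omega
    have e2 : m - 1 - (cs.drop 1).length = 0 := by omega
    rw [e1, e2, List.drop_zero]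
  have hpre : cs <+: cs.drop m ++ cs.dropLast := by
    conv_lhs => rw [← hrot]
    rw [List.prefix_append_right_inj]
    rw [List.dropLast_eq_take]
    exact List.take_prefix_take_left (by omega)
  have : cs <+: (cs.drop 1 ++ cs.dropLast).drop (m - 1) := by rw [hdr]; exact hpre
  exact this.isInfix.trans (List.drop_suffix (m - 1) _).isInfix

theorem pvRot_of_infix (cs : List Char) (h : cs <:+: cs.drop 1 ++ cs.dropLast) (hne : cs ≠ []) :
    ∃ k : Nat, 1 ≤ k ∧ k < cs.length ∧ pvRot cs k := by
  obtain ⟨t, u, htu⟩ := h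
  have hL1 : 1 ≤ cs.length := List.length_pos_iff.mpr hne
  have hlen := congrArg List.length htu
  simp at hlen
  have hL2 : 2 ≤ cs.length := by omega
  have htl : t.length ≤ cs.length - 2 := by omega
  refine ⟨t.length + 1, by omega, by omega, ?_⟩
  intro i hi
  have hx : cs[i]? = (cs.drop 1 ++ cs.dropLast)[t.length + i]? := by
    rw [← htu, List.append_assoc, List.getElem?_append_right (by omega)]
    have e : t.length + i - t.length = i := by omega
    rw [e, List.getElem?_append_left hi]
  by_cases hc : t.length + i < cs.length - 1
  · rw [List.getElem?_append_left (by simp; omega), List.getElem?_drop] at hx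
    have e : (i + (t.length + 1)) % cs.length = 1 + (t.length + i) := by
      rw [Nat.mod_eq_of_lt (by omega)]
      omega
    rw [e, ← hx]
  · rw [List.getElem?_append_right (by simp; omega)] at hx
    have h1 : (cs.drop 1).length = cs.length - 1 := by simp
    rw [h1, List.getElem?_dropLast] at hx
    have hii : t.length + i - (cs.length - 1) < cs.length - 1 := by omega
    rw [if_pos hii] at hx
    have e : (i + (t.length + 1)) % cs.length = t.length + i - (cs.length - 1) := by
      have h2 : i + (t.length + 1) = (t.length + i - (cs.length - 1)) + cs.length := by omega
      rw [h2, Nat.add_mod_right, Nat.mod_eq_of_lt (by omega)]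
    rw [e, ← hx]

theorem pvPropA_of_infix (cs : List Char) (hne : cs ≠ [])
    (h : cs <:+: cs.drop 1 ++ cs.dropLast) : pvPropA cs := by
  obtain ⟨k, hk1, hkL, hrot⟩ := pvRot_of_infix cs h hne
  set g := Nat.gcd k cs.length with hgdef
  have hper := pvPerAll_gcd_of_rot cs k hk1 hkL hrot
  have hg1 : 1 ≤ g := Nat.gcd_pos_of_pos_left cs.length hk1
  have hgd : g ∣ cs.length := Nat.gcd_dvd_right k cs.length
  have hgk : g ≤ k := Nat.le_of_dvd (by omega) (Nat.gcd_dvd_left k cs.length)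
  have hg2 : g ≤ cs.length / 2 := by
    rcases hgd with ⟨c, hc⟩
    have hc2 : 2 ≤ c := by
      rcases Nat.lt_or_ge c 2 with h' | h'
      · interval_cases c <;> omega
      · exact h'
    have : g * 2 ≤ g * c := Nat.mul_le_mul_left g hc2
    omega
  exact ⟨g, hg1, hg2, hgd, hper⟩

-- B's boolean ↔ the infix condition
theorem pvBbool_iff (id : String) :
    pvRepeated id = true
      ↔ id.toList ≠ [] ∧ id.toList <:+: id.toList.drop 1 ++ id.toList.dropLast := by
  unfold pvRepeated
  rw [Bool.and_eq_true, Bool.not_eq_true', beq_eq_false_iff_ne]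
  have hsl : (PySem.Str.slice (id ++ id) (some 1) (some (-1))).toList
      = id.toList.drop 1 ++ id.toList.dropLast := by
    rw [PySem.Str.toList_slice, PySem.Chars.slice_eq_listSlice, String.toList_append,
      pvSlice_double]
  rw [PySem.Str.isIn_iff_infix, hsl]
  constructor
  · rintro ⟨h1, h2⟩
    refine ⟨fun h0 => h1 (String.toList_eq_nil_iff.mp h0), h2⟩
  · rintro ⟨h1, h2⟩
    refine ⟨fun h0 => h1 (by rw [h0]; rfl), h2⟩

-- the two per-string tests agree
theorem pvPred_eq (id : String) :
    pvAouter id.toList (PySem.Str.len id)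
        (PySem.List.pyRange 1 (PySem.Int.floordiv (PySem.Str.len id) 2 + 1) 1)
      = pvRepeated id := by
  have hlen : PySem.Str.len id = (id.toList.length : Int) := rfl
  rw [hlen, Bool.eq_iff_iff, pvAbool_iff, pvBbool_iff]
  constructor
  · exact fun h => pvInfix_of_propA _ h
  · rintro ⟨hne, hinf⟩
    exact pvPropA_of_infix _ hne hinf

-- ===== VERDICT (by name: the statement is the Claim_ definition above) =====
theorem is_super_silly_spec : Claim_equal_is_super_silly := by
  intro ids _
  unfold Spec_is_super_silly is_super_silly is_super_silly_alt
  have hA : ids.foldl (fun acc id =>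
      let length : Int := PySem.Str.len id
      if pvAouter id.toList length (PySem.List.pyRange 1 (PySem.Int.floordiv length 2 + 1) 1)
      then acc ++ [id] else acc) []
      = [] ++ (ids.filter (fun id => pvAouter id.toList (PySem.Str.len id)
          (PySem.List.pyRange 1 (PySem.Int.floordiv (PySem.Str.len id) 2 + 1) 1))).map
            (fun x => x) :=
    PySem.List.foldl_append_if _ _ ids []
  have hB : ids.foldl (fun acc id => if pvRepeated id then acc ++ [id] else acc) []
      = [] ++ (ids.filter pvRepeated).map (fun x => x) :=
    PySem.List.foldl_append_if _ _ ids []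
  rw [hA, hB]
  simp only [List.nil_append, List.map_id_fun', id]
  exact List.filter_congr (fun x _ => pvPred_eq x)
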